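-- pv_equiv track=rewrite | github.com/emrebuzkanli/BBM103 | PA4/blind_valley.py | is_constraints_valid
-- ===== SOURCE A (Python) =====
-- def is_constraints_valid(grid, constraints):
--     high_col = constraints[2]
--     base_col = constraints[3]
--     # Check constraints for each row
--     for r in range(len(grid)):
--         if constraints[0][r] != -1 and grid[r].count('H') != constraints[0][r]:
--             return False
--
--         elif constraints[1][r] != -1 and grid[r].count('B') != constraints[1][r]:
--             return False
--         else:
--             continue
--     # Check constraints for each column
--     for c in range(len(grid[0])):
--         b_counter = []
--
--         h_counter = []
--
--         for r in range(len(grid)):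
--             if grid[r][c] == 'B':
--                 b_counter.append('B')
--             elif grid[r][c] == 'H':
--                 h_counter.append('H')
--
--         if high_col[c] != -1 and h_counter.count('H') != high_col[c]:
--             return False
--         elif base_col[c] != -1 and b_counter.count('B') != base_col[c]:
--             return False
--         else:
--             continue
--
--     return True
-- ===== SOURCE B (Python) =====
-- def is_constraints_valid(grid, constraints):
--     high_row, base_row, high_col, base_col = constraints
--     # Row phase, kept first and index-based so failures happen exactly as specified.
--     for r in range(len(grid)):
--         if high_row[r] != -1 and grid[r].count('H') != high_row[r]:
--             return False
--         if base_row[r] != -1 and grid[r].count('B') != base_row[r]: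
--             return False
--     # One row-major pass tallies every column at once (no per-column rescans).
--     cols = len(grid[0])
--     col_h = [0] * cols
--     col_b = [0] * cols
--     for row in grid:
--         for c, ch in enumerate(row[:cols]):
--             if ch == 'H':
--                 col_h[c] += 1
--             elif ch == 'B':
--                 col_b[c] += 1
--     # Column phase: compare the tallies against the constraints.
--     for c in range(cols):
--         if high_col[c] != -1 and col_h[c] != high_col[c]:
--             return False
--         if base_col[c] != -1 and col_b[c] != base_col[c]:
--             return False
--     return True
-- ===== Notes on version B (the rewrite author's own statement) =====
-- stated objective: alternative
-- what changed: Replaces A's column phase (for each column, rescan every row building throwaway counter lists and re-counting them) by a single row-major pass that tallies all columns' H/B counts into two arrays via enumerate(row[:cols]), followed by a plain check loop over the tallies; the row phase is kept first and unchanged.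
import Mathlib
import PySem

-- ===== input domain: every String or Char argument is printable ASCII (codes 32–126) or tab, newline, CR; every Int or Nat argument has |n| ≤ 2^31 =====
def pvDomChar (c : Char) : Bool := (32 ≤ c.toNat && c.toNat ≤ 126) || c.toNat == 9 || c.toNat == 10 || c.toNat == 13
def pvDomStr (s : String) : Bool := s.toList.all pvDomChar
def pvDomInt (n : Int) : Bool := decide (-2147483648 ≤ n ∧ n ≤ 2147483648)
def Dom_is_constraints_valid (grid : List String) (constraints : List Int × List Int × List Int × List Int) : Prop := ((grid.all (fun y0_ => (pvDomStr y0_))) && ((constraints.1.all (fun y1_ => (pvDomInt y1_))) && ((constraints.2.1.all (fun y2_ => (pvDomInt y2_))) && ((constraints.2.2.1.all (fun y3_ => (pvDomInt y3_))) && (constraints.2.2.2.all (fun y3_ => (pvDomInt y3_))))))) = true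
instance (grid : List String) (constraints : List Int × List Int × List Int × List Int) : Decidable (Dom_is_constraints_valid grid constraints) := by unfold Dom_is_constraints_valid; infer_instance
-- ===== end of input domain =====

-- ===== PORT A =====
-- B replaces A's per-column rescans by one row-major tally pass over the grid.
-- pyGetD defaults below stand where Python would raise IndexError; Pre_ excludes exactly those inputs.

-- A's row loop: 'for r in range(len(grid)): …' (early 'return False' = result false).
def pvA_rowLoop (grid : List String) (r0 r1 : List Int) : List Int → Bool
  | [] => true
  | r :: rs =>
    let row := PySem.List.pyGetD grid r ""
    if PySem.List.pyGetD r0 r 0 ≠ -1 ∧ (PySem.Str.count row "H" : Int) ≠ PySem.List.pyGetD r0 r 0 then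
      false
    else if PySem.List.pyGetD r1 r 0 ≠ -1 ∧ (PySem.Str.count row "B" : Int) ≠ PySem.List.pyGetD r1 r 0 then
      false
    else pvA_rowLoop grid r0 r1 rs

-- A's inner column scan: builds b_counter / h_counter by appending, exactly as the Python does.
def pvA_colScan (grid : List String) (c : Int) : List Int → List Char × List Char → List Char × List Char
  | [], acc => acc
  | r :: rs, (bc, hc) =>
    let ch := PySem.List.pyGetD (PySem.List.pyGetD grid r "").toList c ' '   -- grid[r][c]
    if ch = 'B' then pvA_colScan grid c rs (bc ++ ['B'], hc)
    else if ch = 'H' then pvA_colScan grid c rs (bc, hc ++ ['H'])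
    else pvA_colScan grid c rs (bc, hc)

-- A's outer column loop: 'for c in range(len(grid[0])): …'.
def pvA_colLoop (grid : List String) (hcol bcol : List Int) : List Int → Bool
  | [] => true
  | c :: cs =>
    let acc := pvA_colScan grid c (PySem.List.pyRange 0 (grid.length : Int) 1) ([], [])
    if PySem.List.pyGetD hcol c 0 ≠ -1 ∧ (acc.2.count 'H' : Int) ≠ PySem.List.pyGetD hcol c 0 then
      false
    else if PySem.List.pyGetD bcol c 0 ≠ -1 ∧ (acc.1.count 'B' : Int) ≠ PySem.List.pyGetD bcol c 0 then
      false
    else pvA_colLoop grid hcol bcol cs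

def is_constraints_valid (grid : List String) (constraints : List Int × List Int × List Int × List Int) : Bool :=
  pvA_rowLoop grid constraints.1 constraints.2.1 (PySem.List.pyRange 0 (grid.length : Int) 1) &&
  pvA_colLoop grid constraints.2.2.1 constraints.2.2.2
    (PySem.List.pyRange 0 (PySem.Str.len (PySem.List.pyGetD grid 0 "")) 1)

-- ===== PORT B =====
-- B's row phase: same index loop as the spec ('for r in range(len(grid)): …').
def pvB_rowLoop (grid : List String) (r0 r1 : List Int) : List Int → Bool
  | [] => true
  | r :: rs =>
    if PySem.List.pyGetD r0 r 0 ≠ -1 ∧ (PySem.Str.count (PySem.List.pyGetD grid r "") "H" : Int) ≠ PySem.List.pyGetD r0 r 0 then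
      false
    else if PySem.List.pyGetD r1 r 0 ≠ -1 ∧ (PySem.Str.count (PySem.List.pyGetD grid r "") "B" : Int) ≠ PySem.List.pyGetD r1 r 0 then
      false
    else pvB_rowLoop grid r0 r1 rs

-- 'col[c] += 1' on a Python list (the enumerate index is nonnegative and in range).
def pvB_bump (l : List Int) (c : Int) : List Int := l.set c.toNat (l.getD c.toNat 0 + 1)

-- B's inner pass over one row: 'for c, ch in enumerate(row[:cols]): …'.
def pvB_rowTally (row : String) (cols : Nat) (acc : List Int × List Int) : List Int × List Int :=
  (PySem.List.enumerate (PySem.List.slice row.toList none (some (cols : Int)))).foldl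
    (fun acc p =>
      if p.2 = 'H' then (pvB_bump acc.1 p.1, acc.2)
      else if p.2 = 'B' then (acc.1, pvB_bump acc.2 p.1)
      else acc)
    acc

-- B's column phase: 'for c in range(cols): …' against the tallies.
def pvB_colCheck (hcol bcol colh colb : List Int) : List Int → Bool
  | [] => true
  | c :: cs =>
    if PySem.List.pyGetD hcol c 0 ≠ -1 ∧ PySem.List.pyGetD colh c 0 ≠ PySem.List.pyGetD hcol c 0 then
      false
    else if PySem.List.pyGetD bcol c 0 ≠ -1 ∧ PySem.List.pyGetD colb c 0 ≠ PySem.List.pyGetD bcol c 0 then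
      false
    else pvB_colCheck hcol bcol colh colb cs

def is_constraints_valid_alt (grid : List String) (constraints : List Int × List Int × List Int × List Int) : Bool :=
  pvB_rowLoop grid constraints.1 constraints.2.1 (PySem.List.pyRange 0 (grid.length : Int) 1) &&
  (let cols : Nat := (PySem.List.pyGetD grid 0 "").toList.length   -- len(grid[0])
   let t := grid.foldl (fun acc row => pvB_rowTally row cols acc)
     (List.replicate cols 0, List.replicate cols 0)
   pvB_colCheck constraints.2.2.1 constraints.2.2.2 t.1 t.2 (PySem.List.pyRange 0 (cols : Int) 1))

-- ===== PRECONDITION & SPEC =====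
-- 'row r passes its checks without raising' (needs r < len(constraints[0]) and, if the H-check
-- does not already fail, r < len(constraints[1])).
def pvRowPass (grid : List String) (c0 c1 : List Int) (r : Nat) : Bool :=
  decide (r < c0.length) &&
  !(decide (c0.getD r 0 ≠ -1) && decide ((PySem.Str.count (grid.getD r "") "H" : Int) ≠ c0.getD r 0)) &&
  decide (r < c1.length) &&
  !(decide (c1.getD r 0 ≠ -1) && decide ((PySem.Str.count (grid.getD r "") "B" : Int) ≠ c1.getD r 0))

-- 'row r's checks can be evaluated without raising' (they may then fail, giving False).
def pvRowOK (grid : List String) (c0 c1 : List Int) (r : Nat) : Bool :=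
  decide (r < c0.length) &&
  ((decide (c0.getD r 0 ≠ -1) && decide ((PySem.Str.count (grid.getD r "") "H" : Int) ≠ c0.getD r 0)) ||
   decide (r < c1.length))

-- 'column c passes its checks without raising' (every row reaches index c; both constraint
-- lists reach index c as evaluated left to right).
def pvColPass (grid : List String) (hc bc : List Int) (c : Nat) : Bool :=
  grid.all (fun row => decide (c < row.toList.length)) && decide (c < hc.length) &&
  !(decide (hc.getD c 0 ≠ -1) && decide (((grid.countP (fun row => row.toList.getD c ' ' == 'H')) : Int) ≠ hc.getD c 0)) &&
  decide (c < bc.length) &&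
  !(decide (bc.getD c 0 ≠ -1) && decide (((grid.countP (fun row => row.toList.getD c ' ' == 'B')) : Int) ≠ bc.getD c 0))

-- 'column c's checks can be evaluated without raising'.
def pvColOK (grid : List String) (hc bc : List Int) (c : Nat) : Bool :=
  grid.all (fun row => decide (c < row.toList.length)) && decide (c < hc.length) &&
  ((decide (hc.getD c 0 ≠ -1) && decide (((grid.countP (fun row => row.toList.getD c ' ' == 'H')) : Int) ≠ hc.getD c 0)) ||
   decide (c < bc.length))

-- Pre_ admits EXACTLY the inputs on which the Python A returns (True or False) and excludes
-- exactly those where it raises IndexError: either some row check, reached with all earlier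
-- rows passing, fails without raising (A returns False there, before any further indexing),
-- or every row passes, the grid is nonempty (len(grid[0]) is read), and the column phase in
-- turn either passes every column or fails at its first reached column without raising.
def Pre_is_constraints_valid (grid : List String) (constraints : List Int × List Int × List Int × List Int) : Prop :=
  (∃ r < grid.length, pvRowOK grid constraints.1 constraints.2.1 r = true ∧
      pvRowPass grid constraints.1 constraints.2.1 r = false ∧
      (∀ r' < r, pvRowPass grid constraints.1 constraints.2.1 r' = true)) ∨
  ((∀ r < grid.length, pvRowPass grid constraints.1 constraints.2.1 r = true) ∧ grid ≠ [] ∧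
    ((∀ c < (grid.headD "").toList.length, pvColPass grid constraints.2.2.1 constraints.2.2.2 c = true) ∨
     (∃ c < (grid.headD "").toList.length, pvColOK grid constraints.2.2.1 constraints.2.2.2 c = true ∧
        pvColPass grid constraints.2.2.1 constraints.2.2.2 c = false ∧
        (∀ c' < c, pvColPass grid constraints.2.2.1 constraints.2.2.2 c' = true))))
instance (grid : List String) (constraints : List Int × List Int × List Int × List Int) : Decidable (Pre_is_constraints_valid grid constraints) := by unfold Pre_is_constraints_valid; infer_instance

def pvWitness_is_constraints_valid : List String × (List Int × List Int × List Int × List Int) :=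
  (["HB", "BH"], ([1, 1], [1, 1], [1, 1], [1, 1]))

def Spec_is_constraints_valid (grid : List String) (constraints : List Int × List Int × List Int × List Int) (out : Bool) : Prop := out = is_constraints_valid_alt grid constraints
instance (grid : List String) (constraints : List Int × List Int × List Int × List Int) (out : Bool) : Decidable (Spec_is_constraints_valid grid constraints out) := by unfold Spec_is_constraints_valid; infer_instance

-- ===== CLAIM (what is proved, stated in full; the proofs are below) =====
def Claim_equal_is_constraints_valid : Prop := ∀ (grid : List String) (constraints : List Int × List Int × List Int × List Int), Dom_is_constraints_valid grid constraints → Pre_is_constraints_valid grid constraints → Spec_is_constraints_valid grid constraints (is_constraints_valid grid constraints)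

-- ===== LEMMAS AND PROOFS =====

-- the character grid[r][c] as both ports read it (default ' ' when out of range)
def pvCharAt (row : String) (j : Nat) : Char := row.toList.getD j ' '

-- the two row phases are the same index loop
theorem pv_rowLoops_eq (grid : List String) (r0 r1 : List Int) (rs : List Int) :
    pvA_rowLoop grid r0 r1 rs = pvB_rowLoop grid r0 r1 rs := by
  induction rs with
  | nil => rfl
  | cons r rs ih =>
    simp only [pvA_rowLoop, pvB_rowLoop]
    split_ifs <;> first | rfl | exact ih

-- A's per-column scan counts
theorem pvA_colScan_counts (grid : List String) (c : Int) (rs : List Int) : ∀ bc hc : List Char,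
    (pvA_colScan grid c rs (bc, hc)).1.count 'B' =
        bc.count 'B' + rs.countP (fun r => PySem.List.pyGetD (PySem.List.pyGetD grid r "").toList c ' ' == 'B') ∧
    (pvA_colScan grid c rs (bc, hc)).2.count 'H' =
        hc.count 'H' + rs.countP (fun r => PySem.List.pyGetD (PySem.List.pyGetD grid r "").toList c ' ' == 'H') := by
  induction rs with
  | nil => intro bc hc; simp [pvA_colScan]
  | cons r rs ih =>
    intro bc hc
    simp only [pvA_colScan]
    by_cases hB : PySem.List.pyGetD (PySem.List.pyGetD grid r "").toList c ' ' = 'B'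
    · have hH : PySem.List.pyGetD (PySem.List.pyGetD grid r "").toList c ' ' ≠ 'H' := by
        rw [hB]; decide
      rw [if_pos hB]
      obtain ⟨e1, e2⟩ := ih (bc ++ ['B']) hc
      refine ⟨?_, ?_⟩
      · rw [e1]; simp [hB]; omega
      · rw [e2]; simp [hB]
    · rw [if_neg hB]
      by_cases hH : PySem.List.pyGetD (PySem.List.pyGetD grid r "").toList c ' ' = 'H'
      · rw [if_pos hH]
        obtain ⟨e1, e2⟩ := ih bc (hc ++ ['H'])
        refine ⟨?_, ?_⟩
        · rw [e1]; simp [hB]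
        · rw [e2]; simp [hH]; omega
      · rw [if_neg hH]
        obtain ⟨e1, e2⟩ := ih bc hc
        refine ⟨?_, ?_⟩
        · rw [e1]; simp [hB]
        · rw [e2]; simp [hH]

theorem pvB_bump_length (l : List Int) (c : Int) : (pvB_bump l c).length = l.length := by
  simp [pvB_bump]

theorem pvB_bump_getD_self (l : List Int) (k : Nat) (h : k < l.length) :
    (pvB_bump l (k : Int)).getD k 0 = l.getD k 0 + 1 := by
  simp [pvB_bump, List.getD_eq_getElem?_getD, h]

theorem pvB_bump_getD_ne (l : List Int) (k j : Nat) (h : k ≠ j) :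
    (pvB_bump l (k : Int)).getD j 0 = l.getD j 0 := by
  simp [pvB_bump, List.getD_eq_getElem?_getD, List.getElem?_set_ne h]

-- the enumerate fold updates slot s+k by cell k of the enumerated suffix
theorem pvB_tallyGo_spec (ls : List Char) : ∀ (s : Nat) (acc : List Int × List Int),
    s + ls.length ≤ acc.1.length → s + ls.length ≤ acc.2.length →
    ((PySem.List.enumerate ls (s : Int)).foldl
      (fun acc p =>
        if p.2 = 'H' then (pvB_bump acc.1 p.1, acc.2)
        else if p.2 = 'B' then (acc.1, pvB_bump acc.2 p.1)
        else acc) acc).1.length = acc.1.length ∧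
    ((PySem.List.enumerate ls (s : Int)).foldl
      (fun acc p =>
        if p.2 = 'H' then (pvB_bump acc.1 p.1, acc.2)
        else if p.2 = 'B' then (acc.1, pvB_bump acc.2 p.1)
        else acc) acc).2.length = acc.2.length ∧
    ∀ j : Nat,
      ((PySem.List.enumerate ls (s : Int)).foldl
        (fun acc p =>
          if p.2 = 'H' then (pvB_bump acc.1 p.1, acc.2)
          else if p.2 = 'B' then (acc.1, pvB_bump acc.2 p.1)
          else acc) acc).1.getD j 0 =
        acc.1.getD j 0 + (if s ≤ j ∧ j - s < ls.length ∧ ls.getD (j - s) ' ' = 'H' then 1 else 0) ∧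
      ((PySem.List.enumerate ls (s : Int)).foldl
        (fun acc p =>
          if p.2 = 'H' then (pvB_bump acc.1 p.1, acc.2)
          else if p.2 = 'B' then (acc.1, pvB_bump acc.2 p.1)
          else acc) acc).2.getD j 0 =
        acc.2.getD j 0 + (if s ≤ j ∧ j - s < ls.length ∧ ls.getD (j - s) ' ' = 'B' ∧ ls.getD (j - s) ' ' ≠ 'H' then 1 else 0) := by
  induction ls with
  | nil =>
    intro s acc _ _
    refine ⟨by simp [PySem.List.enumerate_nil], by simp [PySem.List.enumerate_nil], fun j => ?_⟩
    have hno1 : ¬(s ≤ j ∧ j - s < ([] : List Char).length ∧ ([] : List Char).getD (j - s) ' ' = 'H') := by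
      rintro ⟨-, h, -⟩; simp at h
    have hno2 : ¬(s ≤ j ∧ j - s < ([] : List Char).length ∧ ([] : List Char).getD (j - s) ' ' = 'B' ∧ ([] : List Char).getD (j - s) ' ' ≠ 'H') := by
      rintro ⟨-, h, -⟩; simp at h
    rw [if_neg hno1, if_neg hno2]
    constructor
    · simp [PySem.List.enumerate_nil]
    · simp [PySem.List.enumerate_nil]
  | cons ch ls ih =>
    intro s acc hl1 hl2
    rw [PySem.List.enumerate_cons, List.foldl_cons]
    rw [show ((s : Int) + 1) = (((s + 1 : Nat) : Nat) : Int) by push_cast; ring]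
    have hs1 : s < acc.1.length := by simp at hl1; omega
    have hs2 : s < acc.2.length := by simp at hl2; omega
    -- condition bridges
    have hcH0 : (s ≤ s ∧ s - s < (ch :: ls).length ∧ (ch :: ls).getD (s - s) ' ' = 'H') ↔ ch = 'H' := by
      simp
    have hcB0 : (s ≤ s ∧ s - s < (ch :: ls).length ∧ (ch :: ls).getD (s - s) ' ' = 'B' ∧ (ch :: ls).getD (s - s) ' ' ≠ 'H') ↔ (ch = 'B' ∧ ch ≠ 'H') := by
      simp
    have hgds : ∀ j : Nat, s < j → ∀ d : Char, (ch :: ls).getD (j - s) d = ls.getD (j - s - 1) d := by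
      intro j hj d
      rw [show j - s = (j - s - 1) + 1 from by omega]
      rfl
    have hiffH : ∀ j : Nat, s < j →
        ((s + 1 ≤ j ∧ j - (s + 1) < ls.length ∧ ls.getD (j - (s + 1)) ' ' = 'H') ↔
         (s ≤ j ∧ j - s < (ch :: ls).length ∧ (ch :: ls).getD (j - s) ' ' = 'H')) := by
      intro j hj
      rw [hgds j hj, show j - (s + 1) = j - s - 1 from by omega]
      constructor
      · rintro ⟨h1, h2, h3⟩; exact ⟨by omega, by simp; omega, h3⟩
      · rintro ⟨h1, h2, h3⟩; simp at h2; exact ⟨by omega, by omega, h3⟩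
    have hiffB : ∀ j : Nat, s < j →
        ((s + 1 ≤ j ∧ j - (s + 1) < ls.length ∧ ls.getD (j - (s + 1)) ' ' = 'B' ∧ ls.getD (j - (s + 1)) ' ' ≠ 'H') ↔
         (s ≤ j ∧ j - s < (ch :: ls).length ∧ (ch :: ls).getD (j - s) ' ' = 'B' ∧ (ch :: ls).getD (j - s) ' ' ≠ 'H')) := by
      intro j hj
      rw [hgds j hj, show j - (s + 1) = j - s - 1 from by omega]
      constructor
      · rintro ⟨h1, h2, h3⟩; exact ⟨by omega, by simp; omega, h3⟩
      · rintro ⟨h1, h2, h3⟩; simp at h2; exact ⟨by omega, by omega, h3⟩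
    have hnoLt : ∀ j : Nat, j < s → ∀ P : Prop, ¬(s ≤ j ∧ P) :=
      fun j hj P hc => absurd hc.1 (by omega)
    have hnoEq : ∀ P : Prop, ¬(s + 1 ≤ s ∧ P) :=
      fun P hc => absurd hc.1 (by omega)
    have hnoLt1 : ∀ j : Nat, j < s → ∀ P : Prop, ¬(s + 1 ≤ j ∧ P) :=
      fun j hj P hc => absurd hc.1 (by omega)
    by_cases hH : ch = 'H'
    · rw [if_pos hH]
      obtain ⟨L1, L2, hj⟩ := ih (s + 1) (pvB_bump acc.1 (s : Int), acc.2)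
        (by rw [pvB_bump_length]; simp at hl1 ⊢; omega) (by simp at hl2 ⊢; omega)
      rw [pvB_bump_length] at L1
      refine ⟨L1, L2, fun j => ?_⟩
      obtain ⟨e1, e2⟩ := hj j
      rcases Nat.lt_trichotomy j s with hlt | heq | hgt
      · refine ⟨?_, ?_⟩
        · rw [e1, pvB_bump_getD_ne _ _ _ (by omega),
            if_neg (hnoLt1 j hlt _), if_neg (hnoLt j hlt _)]
        · rw [e2, if_neg (hnoLt1 j hlt _), if_neg (hnoLt j hlt _)]
      · subst heq
        refine ⟨?_, ?_⟩
        · rw [e1, pvB_bump_getD_self _ _ hs1, if_neg (hnoEq _),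
            if_congr hcH0 rfl rfl, if_pos hH]
          ring
        · rw [e2, if_neg (hnoEq _), if_congr hcB0 rfl rfl,
            if_neg (fun hc => hc.2 hH)]
      · refine ⟨?_, ?_⟩
        · rw [e1, pvB_bump_getD_ne _ _ _ (by omega), if_congr (hiffH j hgt) rfl rfl]
        · rw [e2, if_congr (hiffB j hgt) rfl rfl]
    · rw [if_neg hH]
      by_cases hB : ch = 'B'
      · rw [if_pos hB]
        obtain ⟨L1, L2, hj⟩ := ih (s + 1) (acc.1, pvB_bump acc.2 (s : Int))
          (by simp at hl1 ⊢; omega) (by rw [pvB_bump_length]; simp at hl2 ⊢; omega)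
        rw [pvB_bump_length] at L2
        refine ⟨L1, L2, fun j => ?_⟩
        obtain ⟨e1, e2⟩ := hj j
        rcases Nat.lt_trichotomy j s with hlt | heq | hgt
        · refine ⟨?_, ?_⟩
          · rw [e1, if_neg (hnoLt1 j hlt _), if_neg (hnoLt j hlt _)]
          · rw [e2, pvB_bump_getD_ne _ _ _ (by omega),
              if_neg (hnoLt1 j hlt _), if_neg (hnoLt j hlt _)]
        · subst heq
          refine ⟨?_, ?_⟩
          · rw [e1, if_neg (hnoEq _), if_congr hcH0 rfl rfl, if_neg hH]
          · rw [e2, pvB_bump_getD_self _ _ hs2, if_neg (hnoEq _),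
              if_congr hcB0 rfl rfl, if_pos ⟨hB, hH⟩]
            ring
        · refine ⟨?_, ?_⟩
          · rw [e1, if_congr (hiffH j hgt) rfl rfl]
          · rw [e2, pvB_bump_getD_ne _ _ _ (by omega), if_congr (hiffB j hgt) rfl rfl]
      · rw [if_neg hB]
        obtain ⟨L1, L2, hj⟩ := ih (s + 1) acc (by simp at hl1 ⊢; omega) (by simp at hl2 ⊢; omega)
        refine ⟨L1, L2, fun j => ?_⟩
        obtain ⟨e1, e2⟩ := hj j
        rcases Nat.lt_trichotomy j s with hlt | heq | hgt
        · refine ⟨?_, ?_⟩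
          · rw [e1, if_neg (hnoLt1 j hlt _), if_neg (hnoLt j hlt _)]
          · rw [e2, if_neg (hnoLt1 j hlt _), if_neg (hnoLt j hlt _)]
        · subst heq
          refine ⟨?_, ?_⟩
          · rw [e1, if_neg (hnoEq _), if_congr hcH0 rfl rfl, if_neg hH]
          · rw [e2, if_neg (hnoEq _), if_congr hcB0 rfl rfl,
              if_neg (fun hc => hB hc.1)]
        · refine ⟨?_, ?_⟩
          · rw [e1, if_congr (hiffH j hgt) rfl rfl]
          · rw [e2, if_congr (hiffB j hgt) rfl rfl]

-- one row's pass updates each tally slot by its own cell, and preserves lengths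
theorem pvB_rowTally_spec (row : String) (m : Nat) : ∀ acc : List Int × List Int,
    m ≤ acc.1.length → m ≤ acc.2.length →
    (pvB_rowTally row m acc).1.length = acc.1.length ∧
    (pvB_rowTally row m acc).2.length = acc.2.length ∧
    ∀ j : Nat,
      (pvB_rowTally row m acc).1.getD j 0 =
        acc.1.getD j 0 + (if j < m ∧ pvCharAt row j = 'H' then 1 else 0) ∧
      (pvB_rowTally row m acc).2.getD j 0 =
        acc.2.getD j 0 + (if j < m ∧ pvCharAt row j = 'B' ∧ pvCharAt row j ≠ 'H' then 1 else 0) := by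
  intro acc hl1 hl2
  have hsl : PySem.List.slice row.toList none (some ((m : Nat) : Int)) = row.toList.take m := by
    simp [pysem]
  have htl : (row.toList.take m).length ≤ m := by simp
  obtain ⟨L1, L2, hj⟩ := pvB_tallyGo_spec (row.toList.take m) 0 acc (by omega) (by omega)
  simp only [Nat.cast_zero] at L1 L2 hj
  unfold pvB_rowTally
  rw [hsl]
  refine ⟨L1, L2, fun j => ?_⟩
  obtain ⟨e1, e2⟩ := hj j
  simp only [Nat.sub_zero] at e1 e2
  have hgdt : j < (row.toList.take m).length → (row.toList.take m).getD j ' ' = row.toList.getD j ' ' := by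
    intro h
    simp only [List.length_take, lt_min_iff] at h
    simp [List.getD_eq_getElem?_getD, h.1]
  have hspace : ¬ j < row.toList.length → pvCharAt row j = ' ' := by
    intro hge
    unfold pvCharAt
    simp [List.getD_eq_getElem?_getD, List.getElem?_eq_none (by omega : row.toList.length ≤ j)]
  have hiff1 : (0 ≤ j ∧ j < (row.toList.take m).length ∧ (row.toList.take m).getD j ' ' = 'H') ↔
      (j < m ∧ pvCharAt row j = 'H') := by
    constructor
    · rintro ⟨-, h2, h3⟩
      rw [hgdt h2] at h3
      simp only [List.length_take, lt_min_iff] at h2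
      exact ⟨h2.1, h3⟩
    · rintro ⟨h1, h2⟩
      have hjr : j < row.toList.length := by
        by_contra hge
        rw [hspace hge] at h2; exact absurd h2 (by decide)
      have hlt : j < (row.toList.take m).length := by
        simp only [List.length_take, lt_min_iff]; exact ⟨h1, hjr⟩
      exact ⟨Nat.zero_le j, hlt, by rw [hgdt hlt]; exact h2⟩
  have hiff2 : (0 ≤ j ∧ j < (row.toList.take m).length ∧ (row.toList.take m).getD j ' ' = 'B' ∧ (row.toList.take m).getD j ' ' ≠ 'H') ↔
      (j < m ∧ pvCharAt row j = 'B' ∧ pvCharAt row j ≠ 'H') := by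
    constructor
    · rintro ⟨-, h2, h3⟩
      rw [hgdt h2] at h3
      simp only [List.length_take, lt_min_iff] at h2
      exact ⟨h2.1, h3⟩
    · rintro ⟨h1, h2, h3⟩
      have hjr : j < row.toList.length := by
        by_contra hge
        rw [hspace hge] at h2; exact absurd h2 (by decide)
      have hlt : j < (row.toList.take m).length := by
        simp only [List.length_take, lt_min_iff]; exact ⟨h1, hjr⟩
      exact ⟨Nat.zero_le j, hlt, by rw [hgdt hlt]; exact h2, by rw [hgdt hlt]; exact h3⟩
  exact ⟨by rw [e1, if_congr hiff1 rfl rfl], by rw [e2, if_congr hiff2 rfl rfl]⟩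

-- the whole grid's pass accumulates each column's counts
theorem pvB_tally_spec (grid : List String) (cols : Nat) : ∀ acc : List Int × List Int,
    acc.1.length = cols → acc.2.length = cols →
    (grid.foldl (fun acc row => pvB_rowTally row cols acc) acc).1.length = cols ∧
    (grid.foldl (fun acc row => pvB_rowTally row cols acc) acc).2.length = cols ∧
    ∀ j < cols,
      (grid.foldl (fun acc row => pvB_rowTally row cols acc) acc).1.getD j 0 =
        acc.1.getD j 0 + (grid.countP (fun row => pvCharAt row j == 'H') : Int) ∧
      (grid.foldl (fun acc row => pvB_rowTally row cols acc) acc).2.getD j 0 =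
        acc.2.getD j 0 + (grid.countP (fun row => pvCharAt row j == 'B' && !(pvCharAt row j == 'H')) : Int) := by
  induction grid with
  | nil => intro acc h1 h2; simp [h1, h2]
  | cons row grid ih =>
    intro acc h1 h2
    obtain ⟨rl1, rl2, rj⟩ := pvB_rowTally_spec row cols acc (by omega) (by omega)
    obtain ⟨fl1, fl2, fj⟩ := ih (pvB_rowTally row cols acc) (by omega) (by omega)
    refine ⟨fl1, fl2, fun j hjc => ?_⟩
    obtain ⟨g1, g2⟩ := fj j hjc
    obtain ⟨e1, e2⟩ := rj j
    constructor
    · rw [List.foldl_cons, g1, e1, List.countP_cons]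
      by_cases hH : pvCharAt row j = 'H'
      · rw [if_pos ⟨hjc, hH⟩]
        simp [hH]
        omega
      · rw [if_neg (fun hc => hH hc.2)]
        simp [hH]
    · rw [List.foldl_cons, g2, e2, List.countP_cons]
      by_cases hB : pvCharAt row j = 'B' ∧ pvCharAt row j ≠ 'H'
      · rw [if_pos ⟨hjc, hB⟩]
        simp [hB.1]
        omega
      · rw [if_neg (fun hc => hB hc.2)]
        rcases Classical.em (pvCharAt row j = 'B') with hb | hb
        · have hh : pvCharAt row j = 'H' := by
            by_contra hh; exact hB ⟨hb, hh⟩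
          simp [hb] at *
        · simp [hb]

-- the two column phases agree for in-range columns
theorem pv_col_phases_eq (grid : List String) (hcol bcol : List Int) (cols : Nat) :
    ∀ cs : List Int, (∀ c ∈ cs, 0 ≤ c ∧ c < (cols : Int)) →
    pvA_colLoop grid hcol bcol cs =
      pvB_colCheck hcol bcol
        (grid.foldl (fun acc row => pvB_rowTally row cols acc)
          (List.replicate cols 0, List.replicate cols 0)).1
        (grid.foldl (fun acc row => pvB_rowTally row cols acc)
          (List.replicate cols 0, List.replicate cols 0)).2
        cs := by
  intro cs
  induction cs with
  | nil => intro _; rfl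
  | cons c cs ih =>
    intro hmem
    obtain ⟨hc0, hcc⟩ := hmem c (List.mem_cons_self ..)
    have hcnat : c.toNat < cols := by omega
    have hcast : ((c.toNat : Nat) : Int) = c := Int.toNat_of_nonneg hc0
    obtain ⟨_, _, ftj⟩ := pvB_tally_spec grid cols (List.replicate cols 0, List.replicate cols 0)
      (by simp) (by simp)
    obtain ⟨t1, t2⟩ := ftj c.toNat hcnat
    obtain ⟨s1, s2⟩ := pvA_colScan_counts grid c (PySem.List.pyRange 0 (grid.length : Int) 1) [] []
    -- turn A's index-loop counts into structural counts over the grid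
    have hmap : (PySem.List.pyRange 0 (grid.length : Int) 1).map (fun r => PySem.List.pyGetD grid r "") = grid :=
      PySem.List.map_pyGetD_pyRange_zero ..
    have hcntB : (PySem.List.pyRange 0 (grid.length : Int) 1).countP
        (fun r => PySem.List.pyGetD (PySem.List.pyGetD grid r "").toList c ' ' == 'B') =
        grid.countP (fun row => pvCharAt row c.toNat == 'B') := by
      have := List.countP_map (p := fun row => PySem.List.pyGetD row.toList c ' ' == 'B')
        (f := fun r => PySem.List.pyGetD grid r "") (l := PySem.List.pyRange 0 (grid.length : Int) 1)
      rw [hmap] at this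
      simp only [Function.comp_def] at this
      rw [← this]
      apply List.countP_congr
      intro row _
      rw [← hcast, PySem.List.pyGetD_natCast]
      rfl
    have hcntH : (PySem.List.pyRange 0 (grid.length : Int) 1).countP
        (fun r => PySem.List.pyGetD (PySem.List.pyGetD grid r "").toList c ' ' == 'H') =
        grid.countP (fun row => pvCharAt row c.toNat == 'H') := by
      have := List.countP_map (p := fun row => PySem.List.pyGetD row.toList c ' ' == 'H')
        (f := fun r => PySem.List.pyGetD grid r "") (l := PySem.List.pyRange 0 (grid.length : Int) 1)
      rw [hmap] at this
      simp only [Function.comp_def] at this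
      rw [← this]
      apply List.countP_congr
      intro row _
      rw [← hcast, PySem.List.pyGetD_natCast]
      rfl
    -- the two tested quantities coincide
    have hq1 : ((pvA_colScan grid c (PySem.List.pyRange 0 (grid.length : Int) 1) ([], [])).2.count 'H' : Int) =
        PySem.List.pyGetD (grid.foldl (fun acc row => pvB_rowTally row cols acc)
          (List.replicate cols 0, List.replicate cols 0)).1 c 0 := by
      have hg : PySem.List.pyGetD (grid.foldl (fun acc row => pvB_rowTally row cols acc)
          (List.replicate cols 0, List.replicate cols 0)).1 c 0 =
          (grid.foldl (fun acc row => pvB_rowTally row cols acc)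
          (List.replicate cols 0, List.replicate cols 0)).1.getD c.toNat 0 := by
        rw [← hcast, PySem.List.pyGetD_natCast, Int.toNat_natCast]
      rw [s2, hcntH, hg, t1]
      simp
    have hq2 : ((pvA_colScan grid c (PySem.List.pyRange 0 (grid.length : Int) 1) ([], [])).1.count 'B' : Int) =
        PySem.List.pyGetD (grid.foldl (fun acc row => pvB_rowTally row cols acc)
          (List.replicate cols 0, List.replicate cols 0)).2 c 0 := by
      have hg : PySem.List.pyGetD (grid.foldl (fun acc row => pvB_rowTally row cols acc)
          (List.replicate cols 0, List.replicate cols 0)).2 c 0 =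
          (grid.foldl (fun acc row => pvB_rowTally row cols acc)
          (List.replicate cols 0, List.replicate cols 0)).2.getD c.toNat 0 := by
        rw [← hcast, PySem.List.pyGetD_natCast, Int.toNat_natCast]
      rw [s1, hcntB, hg, t2]
      have : grid.countP (fun row => pvCharAt row c.toNat == 'B') =
          grid.countP (fun row => pvCharAt row c.toNat == 'B' && !(pvCharAt row c.toNat == 'H')) := by
        apply List.countP_congr
        intro row _
        by_cases hb : pvCharAt row c.toNat = 'B'
        · simp [hb]
        · simp [hb]
      rw [this]
      simp
    simp only [pvA_colLoop, pvB_colCheck]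
    rw [hq1, hq2, ih (fun x hx => hmem x (List.mem_cons_of_mem _ hx))]

-- ===== VERDICT (by name: the statement is the Claim_ definition above) =====
theorem is_constraints_valid_spec : Claim_equal_is_constraints_valid := by
  intro grid constraints _ _
  unfold Spec_is_constraints_valid is_constraints_valid is_constraints_valid_alt
  have hlen : PySem.Str.len (PySem.List.pyGetD grid 0 "") =
      (((PySem.List.pyGetD grid 0 "").toList.length : Nat) : Int) := by
    simp
  rw [pv_rowLoops_eq, hlen]
  rw [pv_col_phases_eq grid constraints.2.2.1 constraints.2.2.2
    ((PySem.List.pyGetD grid 0 "").toList.length) _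
    (fun x hx => by rw [PySem.List.mem_pyRange_one] at hx; exact hx)]
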